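-- pv_equiv track=rewrite | github.com/MAYALURI-ANUSHA/Practice_Codes | 26A.py | solve_test_case
-- ===== SOURCE A (Python) =====
-- def solve_test_case(n, k, a):
--     max_count = 0  # Maximum count of k in a subsegment
--     current_count = 0  # Current count of k in the current subsegment
--
--     for i in range(n):
--         if a[i] == k:
--             current_count += 1
--         else:
--             max_count = max(max_count, current_count)
--             current_count = 0
--
--     max_count = max(max_count, current_count)
--
--     if max_count >= 1:
--         return "YES"
--     else:
--         return "NO"
-- ===== SOURCE B (Python) =====
-- def solve_test_case(n, k, a):
--     for i in range(n):
--         if a[i] == k: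
--             return "YES"
--     return "NO"
-- ===== Notes on version B (the rewrite author's own statement) =====
-- stated objective: simpler
-- what changed: B drops A's max/current consecutive-run counters entirely and does a short-circuiting scan: return "YES" at the first index i < n with a[i] == k, else "NO" after the loop.
import Mathlib
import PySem

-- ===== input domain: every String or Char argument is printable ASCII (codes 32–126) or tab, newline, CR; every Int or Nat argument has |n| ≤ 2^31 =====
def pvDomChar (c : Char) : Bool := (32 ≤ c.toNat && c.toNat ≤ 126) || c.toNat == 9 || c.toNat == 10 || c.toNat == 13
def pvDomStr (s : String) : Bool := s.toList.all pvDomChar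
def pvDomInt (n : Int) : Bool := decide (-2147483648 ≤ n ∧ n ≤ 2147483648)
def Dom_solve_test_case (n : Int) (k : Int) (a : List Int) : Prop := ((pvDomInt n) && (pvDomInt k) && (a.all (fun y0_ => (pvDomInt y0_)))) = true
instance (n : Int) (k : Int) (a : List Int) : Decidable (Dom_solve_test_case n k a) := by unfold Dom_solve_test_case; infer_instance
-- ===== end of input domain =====

-- B replaces A's run-length counter bookkeeping with a short-circuiting first-match scan (objective: simpler).

-- ===== PORT A =====
-- a[i] is ported as pyGetD a i 0; inside Pre_ (n ≤ len a) every index 0 ≤ i < n is in range, so this is exact there.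
def solve_test_case (n : Int) (k : Int) (a : List Int) : String :=
  let s := (PySem.List.pyRange 0 n 1).foldl
    (fun (st : Int × Int) i =>
      if PySem.List.pyGetD a i 0 = k then (st.1, st.2 + 1) else (max st.1 st.2, 0))
    (0, 0)
  let max_count := max s.1 s.2
  if max_count ≥ 1 then "YES" else "NO"

-- ===== PORT B =====
-- B's loop 'for i in range(n)' with early return, as structural recursion on the remaining count.
def pvAltGo (k : Int) (a : List Int) : Nat → Int → String
  | 0, _ => "NO"
  | fuel+1, i => if PySem.List.pyGetD a i 0 = k then "YES" else pvAltGo k a fuel (i + 1)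

def solve_test_case_alt (n : Int) (k : Int) (a : List Int) : String :=
  pvAltGo k a n.toNat 0

-- ===== PRECONDITION & SPEC =====
-- Pre_ excludes exactly the inputs where Python A raises IndexError: n > len(a).
def Pre_solve_test_case (n : Int) (_k : Int) (a : List Int) : Prop := n ≤ (a.length : Int)
instance (n : Int) (k : Int) (a : List Int) : Decidable (Pre_solve_test_case n k a) := by unfold Pre_solve_test_case; infer_instance
def pvWitness_solve_test_case : Int × Int × List Int := (2, 5, [3, 5])

def Spec_solve_test_case (n : Int) (k : Int) (a : List Int) (out : String) : Prop := out = solve_test_case_alt n k a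
instance (n : Int) (k : Int) (a : List Int) (out : String) : Decidable (Spec_solve_test_case n k a out) := by unfold Spec_solve_test_case; infer_instance

-- ===== CLAIM (what is proved, stated in full; the proofs are below) =====
def Claim_equal_solve_test_case : Prop := ∀ (n : Int) (k : Int) (a : List Int), Dom_solve_test_case n k a → Pre_solve_test_case n k a → Spec_solve_test_case n k a (solve_test_case n k a)

-- ===== LEMMAS AND PROOFS =====

-- A's fold: the final max of the two counters is ≥ 1 iff it started ≥ 1 or some visited index hits k.
theorem pvFoldA_char (k : Int) (a : List Int) (l : List Int) :
    ∀ (mc cc : Int), 0 ≤ mc → 0 ≤ cc →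
      (1 ≤ max (l.foldl (fun (st : Int × Int) i =>
          if PySem.List.pyGetD a i 0 = k then (st.1, st.2 + 1) else (max st.1 st.2, 0)) (mc, cc)).1
             (l.foldl (fun (st : Int × Int) i =>
          if PySem.List.pyGetD a i 0 = k then (st.1, st.2 + 1) else (max st.1 st.2, 0)) (mc, cc)).2
        ↔ 1 ≤ max mc cc ∨ ∃ i ∈ l, PySem.List.pyGetD a i 0 = k) := by
  induction l with
  | nil => intro mc cc _ _; simp
  | cons x t ih =>
    intro mc cc hmc hcc
    simp only [List.foldl_cons]
    by_cases hx : PySem.List.pyGetD a x 0 = k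
    · rw [if_pos hx]
      rw [ih mc (cc + 1) hmc (by omega)]
      constructor
      · intro _; right; exact ⟨x, by simp [hx]⟩
      · intro _; left; omega
    · rw [if_neg hx]
      rw [ih (max mc cc) 0 (by omega) le_rfl]
      constructor
      · rintro (h | ⟨i, hi, hik⟩)
        · left; omega
        · right; exact ⟨i, by simp [hi], hik⟩
      · rintro (h | ⟨i, hi, hik⟩)
        · left; omega
        · rcases List.mem_cons.mp hi with rfl | hi
          · exact absurd hik hx
          · right; exact ⟨i, hi, hik⟩

-- B's loop: "YES" exactly when some index in [i, i+fuel) hits k.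
theorem pvAltGo_char (k : Int) (a : List Int) :
    ∀ (fuel : Nat) (i : Int),
      (pvAltGo k a fuel i = "YES" ↔ ∃ j ∈ PySem.List.pyRange i (i + fuel) 1, PySem.List.pyGetD a j 0 = k) := by
  intro fuel
  induction fuel with
  | zero =>
    intro i
    simp [pvAltGo, PySem.List.pyRange_one_eq_nil (le_refl i)]
  | succ f ih =>
    intro i
    rw [PySem.List.pyRange_one_cons (by push_cast; omega)]
    simp only [pvAltGo]
    by_cases hx : PySem.List.pyGetD a i 0 = k
    · simp [hx]
    · rw [if_neg hx, ih (i + 1)]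
      constructor
      · rintro ⟨j, hj, hjk⟩
        refine ⟨j, List.mem_cons_of_mem _ ?_, hjk⟩
        have := hj; rw [show i + 1 + (f : Int) = i + ((f : Nat) + 1 : Nat) by push_cast; ring] at this
        exact this
      · rintro ⟨j, hj, hjk⟩
        rcases List.mem_cons.mp hj with rfl | hj
        · exact absurd hjk hx
        · refine ⟨j, ?_, hjk⟩
          rw [show i + 1 + (f : Int) = i + ((f : Nat) + 1 : Nat) by push_cast; ring]
          exact hj

theorem pvAltGo_yes_or_no (k : Int) (a : List Int) :
    ∀ (fuel : Nat) (i : Int), pvAltGo k a fuel i = "YES" ∨ pvAltGo k a fuel i = "NO" := by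
  intro fuel
  induction fuel with
  | zero => intro i; right; rfl
  | succ f ih =>
    intro i
    simp only [pvAltGo]
    by_cases hx : PySem.List.pyGetD a i 0 = k
    · left; rw [if_pos hx]
    · rw [if_neg hx]; exact ih (i + 1)

theorem pvRange_toNat (n : Int) : PySem.List.pyRange 0 (0 + (n.toNat : Int)) 1 = PySem.List.pyRange 0 n 1 := by
  by_cases h : 0 ≤ n
  · rw [Int.toNat_of_nonneg h]; ring_nf
  · rw [PySem.List.pyRange_one_eq_nil (by omega), PySem.List.pyRange_one_eq_nil (by omega)]

-- ===== VERDICT (by name: the statement is the Claim_ definition above) =====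
theorem solve_test_case_spec : Claim_equal_solve_test_case := by
  intro n k a _ _
  unfold Spec_solve_test_case solve_test_case solve_test_case_alt
  have hA := pvFoldA_char k a (PySem.List.pyRange 0 n 1) 0 0 le_rfl le_rfl
  have hB := pvAltGo_char k a n.toNat 0
  rw [pvRange_toNat] at hB
  have hA' : 1 ≤ max ((PySem.List.pyRange 0 n 1).foldl (fun (st : Int × Int) i => if PySem.List.pyGetD a i 0 = k then (st.1, st.2 + 1) else (max st.1 st.2, 0)) (0, 0)).1 ((PySem.List.pyRange 0 n 1).foldl (fun (st : Int × Int) i => if PySem.List.pyGetD a i 0 = k then (st.1, st.2 + 1) else (max st.1 st.2, 0)) (0, 0)).2 ↔ ∃ i ∈ PySem.List.pyRange 0 n 1, PySem.List.pyGetD a i 0 = k := by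
    rw [hA]
    constructor
    · rintro (h | h)
      · exact absurd h (by decide)
      · exact h
    · exact Or.inr
  by_cases hex : ∃ j ∈ PySem.List.pyRange 0 n 1, PySem.List.pyGetD a j 0 = k
  · rw [if_pos (hA'.mpr hex), (hB.mpr hex).symm]
  · rw [if_neg (fun h => hex (hA'.mp h))]
    rcases pvAltGo_yes_or_no k a n.toNat 0 with h | h
    · exact absurd (hB.mp h) hex
    · exact h.symm
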